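-- pv_equiv track=rewrite | github.com/PangYuanbo/Llata | system/utils/datautil.py | parse_solution_and_answer
-- ===== SOURCE A (Python) =====
-- def parse_solution_and_answer(full_answer: str):
--     """
--     将 GSM8K 原始的 answer 文本拆分为：
--       - solution: 除最后一行以外的内容 (step-by-step reasoning)
--       - final_answer: 最后一行或最后一句 (最终答案)
--
--     这是一个非常简单的拆分策略，可能需要你根据实际情况调整。
--     """
--     lines = full_answer.strip().split("\n")
--     # 移除末尾空行
--     while lines and not lines[-1].strip():
--         lines.pop()
--     if len(lines) <= 1:
--         # 若只有一行，就都算作 final_answer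
--         return "", lines[0] if lines else ""
--     else:
--         # 否则，前面作为 solution，最后一行作为 final_answer
--         return "\n".join(lines[:-1]), lines[-1]
-- ===== SOURCE B (Python) =====
-- def parse_solution_and_answer(full_answer: str):
--     # Strip once, then split off only the final line with rpartition:
--     # strip() already guarantees the last line is not blank, so no
--     # trailing-blank-line loop is needed.
--     s = full_answer.strip()
--     head, _, tail = s.rpartition("\n")
--     return head, tail
-- ===== Notes on version B (the rewrite author's own statement) =====
-- stated objective: simpler
-- what changed: Instead of splitting into a full list of lines, popping trailing blank lines in a while loop and re-joining all-but-last, B strips once and uses rpartition('\n') to split off only the final line; the blank-line loop disappears because strip() already removes trailing whitespace.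
import Mathlib
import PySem

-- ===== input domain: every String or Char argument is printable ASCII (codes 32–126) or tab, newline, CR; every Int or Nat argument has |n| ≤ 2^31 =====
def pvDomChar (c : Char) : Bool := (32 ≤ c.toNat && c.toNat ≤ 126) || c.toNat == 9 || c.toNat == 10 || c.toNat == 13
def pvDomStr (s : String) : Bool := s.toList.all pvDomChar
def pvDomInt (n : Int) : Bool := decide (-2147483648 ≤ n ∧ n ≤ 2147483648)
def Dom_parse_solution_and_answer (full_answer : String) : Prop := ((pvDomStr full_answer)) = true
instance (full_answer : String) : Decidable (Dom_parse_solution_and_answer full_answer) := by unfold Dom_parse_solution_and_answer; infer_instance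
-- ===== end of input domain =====

-- B strips once and splits off only the final line with an rpartition-style
-- right scan, replacing A's split-into-lines / pop-trailing-blanks / re-join; simpler, same cost.


-- ===== PORT A =====
-- 'while lines and not lines[-1].strip(): lines.pop()' — popping from the end
-- while the last line strips to empty is dropWhile on the reversed list.
def pvPopBlank (ls : List (List Char)) : List (List Char) :=
  (ls.reverse.dropWhile (fun l => PySem.Chars.strip l == [])).reverse

def parse_solution_and_answer (full_answer : String) : String × String :=
  let lines := PySem.Chars.splitOn (PySem.Chars.strip full_answer.toList) ['\n']
  let lines := pvPopBlank lines
  if lines.length ≤ 1 then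
    ("", match lines with | [] => "" | l :: _ => String.mk l)
  else
    (String.mk (PySem.Chars.join ['\n'] (PySem.List.slice lines none (some (-1)))),
     String.mk ((PySem.List.pyGet? lines (-1)).getD []))

-- ===== PORT B =====
-- s.rpartition("\n") for a one-character separator: scan from the right for the
-- last '\n'; none found = Python's ("", "", s) case.
def pvRpart : List Char → Option (List Char × List Char)
  | [] => none
  | c :: rest =>
    match pvRpart rest with
    | some (h, tl) => some (c :: h, tl)
    | none => if c = '\n' then some ([], rest) else none

def parse_solution_and_answer_alt (full_answer : String) : String × String :=
  let s := PySem.Chars.strip full_answer.toList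
  match pvRpart s with
  | none => ("", String.mk s)
  | some (h, tl) => (String.mk h, String.mk tl)

-- ===== PRECONDITION & SPEC =====
def Spec_parse_solution_and_answer (full_answer : String) (out : String × String) : Prop := out = parse_solution_and_answer_alt full_answer
instance (full_answer : String) (out : String × String) : Decidable (Spec_parse_solution_and_answer full_answer out) := by unfold Spec_parse_solution_and_answer; infer_instance

-- ===== CLAIM (what is proved, stated in full; the proofs are below) =====
def Claim_equal_parse_solution_and_answer : Prop := ∀ (full_answer : String), Dom_parse_solution_and_answer full_answer → Spec_parse_solution_and_answer full_answer (parse_solution_and_answer full_answer)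

-- ===== LEMMAS AND PROOFS =====

-- a simple structural model of str.split('\n')
def pvSplit : List Char → List (List Char)
  | [] => [[]]
  | c :: r =>
    if c = '\n' then [] :: pvSplit r
    else
      match pvSplit r with
      | p :: ps => (c :: p) :: ps
      | [] => [[c]]

theorem pvSplit_ne_nil (u : List Char) : pvSplit u ≠ [] := by
  cases u with
  | nil => simp [pvSplit]
  | cons c r =>
    simp only [pvSplit]
    split_ifs
    · simp
    · cases h : pvSplit r <;> simp

theorem splitOn_go_spec (fuel : Nat) (l cur : List Char) (acc : List (List Char))
    (hf : l.length < fuel) :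
    PySem.Chars.splitOn.go ['\n'] fuel l cur acc =
      acc.reverse ++ (match pvSplit l with
        | p :: ps => (cur.reverse ++ p) :: ps
        | [] => []) := by
  induction fuel generalizing l cur acc with
  | zero => omega
  | succ f ih =>
    cases l with
    | nil =>
      simp [PySem.Chars.splitOn.go, pvSplit]
    | cons c rest =>
      by_cases hc : c = '\n'
      · subst hc
        rw [show PySem.Chars.splitOn.go ['\n'] (f + 1) ('\n' :: rest) cur acc =
            PySem.Chars.splitOn.go ['\n'] f rest [] (cur.reverse :: acc) by
          simp [PySem.Chars.splitOn.go, List.isPrefixOf]]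
        rw [ih rest [] (cur.reverse :: acc) (by simp at hf ⊢; omega)]
        cases hp : pvSplit rest with
        | nil => exact absurd hp (pvSplit_ne_nil rest)
        | cons p ps => simp [pvSplit, hp]
      · rw [show PySem.Chars.splitOn.go ['\n'] (f + 1) (c :: rest) cur acc =
            PySem.Chars.splitOn.go ['\n'] f rest (c :: cur) acc by
          simp [PySem.Chars.splitOn.go, List.isPrefixOf, Ne.symm hc]]
        rw [ih rest (c :: cur) acc (by simp at hf ⊢; omega)]
        cases hp : pvSplit rest with
        | nil => exact absurd hp (pvSplit_ne_nil rest)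
        | cons p ps => simp [pvSplit, hc, hp]

theorem splitOn_eq_pvSplit (u : List Char) : PySem.Chars.splitOn u ['\n'] = pvSplit u := by
  unfold PySem.Chars.splitOn
  rw [splitOn_go_spec (u.length + 1) u [] [] (by omega)]
  cases hp : pvSplit u with
  | nil => exact absurd hp (pvSplit_ne_nil u)
  | cons p ps => simp

theorem pvRpart_none_iff (u : List Char) : pvRpart u = none ↔ '\n' ∉ u := by
  induction u with
  | nil => simp [pvRpart]
  | cons c r ih =>
    simp only [pvRpart]
    cases h : pvRpart r with
    | some p => simp [h] at ih; simp [ih]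
    | none =>
      have hr' : '\n' ∉ r := ih.mp h
      by_cases hc : c = '\n'
      · subst hc; simp
      · simp [List.mem_cons, hr', hc]
        exact fun h' => hc h'.symm

theorem pvRpart_some (u h tl : List Char) (hs : pvRpart u = some (h, tl)) :
    u = h ++ '\n' :: tl ∧ '\n' ∉ tl := by
  induction u generalizing h tl with
  | nil => simp [pvRpart] at hs
  | cons c r ih =>
    simp only [pvRpart] at hs
    cases hr : pvRpart r with
    | some p =>
      rw [hr] at hs
      obtain ⟨h1, tl1⟩ := p
      simp at hs
      obtain ⟨hc, htl⟩ := hs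
      obtain ⟨e, hn⟩ := ih h1 tl1 hr
      subst hc htl
      simp [e, hn]
    | none =>
      rw [hr] at hs
      by_cases hc : c = '\n'
      · simp [hc] at hs
        obtain ⟨h1, h2⟩ := hs
        subst h1 h2
        exact ⟨by simp [hc], (pvRpart_none_iff r).mp hr⟩
      · simp [hc] at hs

theorem pvSplit_no_nl (u : List Char) (h : '\n' ∉ u) : pvSplit u = [u] := by
  induction u with
  | nil => simp [pvSplit]
  | cons c r ih =>
    simp at h
    simp [pvSplit, Ne.symm h.1, ih h.2]

theorem pvSplit_append (h tl : List Char) (hn : '\n' ∉ tl) :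
    pvSplit (h ++ '\n' :: tl) = pvSplit h ++ [tl] := by
  induction h with
  | nil => simp [pvSplit, pvSplit_no_nl tl hn]
  | cons c h' ih =>
    by_cases hc : c = '\n'
    · simp [pvSplit, hc, ih]
    · simp only [List.cons_append, pvSplit, if_neg hc, ih]
      cases hp : pvSplit h' with
      | nil => exact absurd hp (pvSplit_ne_nil h')
      | cons p ps => simp

theorem join_pvSplit (u : List Char) : PySem.Chars.join ['\n'] (pvSplit u) = u := by
  induction u with
  | nil => simp [pvSplit, PySem.Chars.join_singleton]
  | cons c r ih =>
    by_cases hc : c = '\n'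
    · subst hc
      rw [show pvSplit ('\n' :: r) = [] :: pvSplit r by simp [pvSplit]]
      cases hp : pvSplit r with
      | nil => exact absurd hp (pvSplit_ne_nil r)
      | cons p ps =>
        rw [PySem.Chars.join_cons_cons]
        rw [hp] at ih
        simp [ih]
    · simp only [pvSplit, if_neg hc]
      cases hp : pvSplit r with
      | nil => exact absurd hp (pvSplit_ne_nil r)
      | cons p ps =>
        rw [hp] at ih
        cases ps with
        | nil => simp_all [PySem.Chars.join_singleton]
        | cons q qs =>
          rw [PySem.Chars.join_cons_cons] at ih ⊢
          simp [ih]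

theorem strip_all_space (u : List Char) (h : PySem.Chars.strip u = []) :
    ∀ c ∈ u, PySem.Chars.isspace c = true := by
  unfold PySem.Chars.strip PySem.Chars.rstrip PySem.Chars.lstrip at h
  rw [List.reverse_eq_nil_iff, List.dropWhile_eq_nil_iff] at h
  intro c hc
  rw [← List.takeWhile_append_dropWhile (p := PySem.Chars.isspace) (l := u)] at hc
  rcases List.mem_append.mp hc with hm | hm
  · exact List.mem_takeWhile_imp hm
  · exact h c (List.mem_reverse.mpr hm)

theorem strip_ne_nil_of_mem (u : List Char) (c : Char) (hc : c ∈ u)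
    (hcs : PySem.Chars.isspace c = false) : PySem.Chars.strip u ≠ [] := by
  intro h
  rw [strip_all_space u h c hc] at hcs
  exact absurd hcs (by simp)

theorem getLast?_strip_not_space (u : List Char) (c : Char)
    (h : (PySem.Chars.strip u).getLast? = some c) : PySem.Chars.isspace c = false := by
  unfold PySem.Chars.strip PySem.Chars.rstrip at h
  rw [List.getLast?_reverse] at h
  cases hd : List.dropWhile PySem.Chars.isspace (PySem.Chars.lstrip u).reverse with
  | nil => rw [hd] at h; simp at h
  | cons a as =>
    rw [hd] at h
    simp at h
    subst h
    have := List.head_dropWhile_not (p := PySem.Chars.isspace)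
        (l := (PySem.Chars.lstrip u).reverse) (by simp [hd])
    simp [hd] at this
    simpa using this

theorem mem_of_getLast?_eq_some {l : List Char} {c : Char} (h : l.getLast? = some c) :
    c ∈ l := by
  obtain ⟨l', rfl⟩ := List.getLast?_eq_some_iff.mp h
  simp

theorem strip_strip_ne (u : List Char) (h : PySem.Chars.strip u ≠ []) :
    PySem.Chars.strip (PySem.Chars.strip u) ≠ [] := by
  cases hg : (PySem.Chars.strip u).getLast? with
  | none => exact absurd (List.getLast?_eq_none_iff.mp hg) h
  | some c =>
    exact strip_ne_nil_of_mem _ c (mem_of_getLast?_eq_some hg)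
      (getLast?_strip_not_space u c hg)

theorem pvPopBlank_id (ls : List (List Char)) (last : List Char)
    (h : PySem.Chars.strip last ≠ []) : pvPopBlank (ls ++ [last]) = ls ++ [last] := by
  unfold pvPopBlank
  rw [List.reverse_append]
  simp [h]

-- ===== VERDICT (by name: the statement is the Claim_ definition above) =====
theorem parse_solution_and_answer_spec : Claim_equal_parse_solution_and_answer := by
  intro s _
  unfold Spec_parse_solution_and_answer parse_solution_and_answer parse_solution_and_answer_alt
  dsimp only
  rw [splitOn_eq_pvSplit]
  cases hr : pvRpart (PySem.Chars.strip s.toList) with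
  | none =>
    have hnl : '\n' ∉ PySem.Chars.strip s.toList := (pvRpart_none_iff _).mp hr
    rw [pvSplit_no_nl _ hnl]
    by_cases htn : PySem.Chars.strip s.toList = []
    · rw [htn]
      simp [pvPopBlank, PySem.Chars.strip, PySem.Chars.lstrip, PySem.Chars.rstrip]
      rfl
    · have hstr : PySem.Chars.strip (PySem.Chars.strip s.toList) ≠ [] :=
        strip_strip_ne s.toList htn
      rw [show [PySem.Chars.strip s.toList] = [] ++ [PySem.Chars.strip s.toList] by simp,
        pvPopBlank_id [] _ hstr]
      simp
  | some p =>
    obtain ⟨h, tl⟩ := p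
    obtain ⟨hteq, hnl⟩ := pvRpart_some _ h tl hr
    have htl : tl ≠ [] := by
      intro he
      subst he
      have hg : (PySem.Chars.strip s.toList).getLast? = some '\n' := by
        rw [hteq]
        exact List.getLast?_concat
      have := getLast?_strip_not_space s.toList '\n' hg
      simp [PySem.Chars.isspace] at this
    obtain ⟨t0, ts, rfl⟩ := List.exists_cons_of_ne_nil htl
    have hgl : (t0 :: ts).getLast? = (PySem.Chars.strip s.toList).getLast? := by
      rw [hteq, List.getLast?_append, List.getLast?_cons_cons]
      cases hg2 : (t0 :: ts).getLast? with
      | none => exact absurd (List.getLast?_eq_none_iff.mp hg2) (by simp)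
      | some c => simp
    have hstr : PySem.Chars.strip (t0 :: ts) ≠ [] := by
      cases hg : (PySem.Chars.strip s.toList).getLast? with
      | none =>
        rw [List.getLast?_eq_none_iff.mp hg] at hteq
        simp at hteq
      | some c =>
        exact strip_ne_nil_of_mem _ c (mem_of_getLast?_eq_some (hgl.trans hg))
          (getLast?_strip_not_space s.toList c hg)
    rw [hteq, pvSplit_append h _ hnl, pvPopBlank_id (pvSplit h) _ hstr]
    have hlen : ¬ (pvSplit h ++ [t0 :: ts]).length ≤ 1 := by
      cases hp : pvSplit h with
      | nil => exact absurd hp (pvSplit_ne_nil h)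
      | cons p ps => simp
    rw [if_neg hlen]
    rw [PySem.List.slice_to_neg_one]
    rw [show (pvSplit h ++ [t0 :: ts]).dropLast = pvSplit h from List.dropLast_concat ..]
    rw [PySem.List.pyGet?_neg_one_append_singleton]
    simp [join_pvSplit]
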